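-- pv_equiv track=rewrite | github.com/TUFLOW-Support/QGIS-TUFLOW-Plugin | tuflow/gui/alg/empty_selector_parameter.py | parse_empty_type_string
-- ===== SOURCE A (Python) =====
-- def parse_empty_type_string(value: str):
--     if not value:
--         return {}
--     d = {}
--     s = value.split(';;')
--     for item in s:
--         empty_type, geom = [x.strip() for x in item.split(':', 1)]
--         d_ = {'P': False, 'L': False, 'R': False}
--         for g in geom.split(','):
--             g = g.strip()
--             if g in d_:
--                 d_[g] = True
--         d[empty_type] = d_
--     return d
-- ===== SOURCE B (Python) =====
-- def parse_empty_type_string(value: str):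
--     # Index-free scanner: consume the string with str.find and slicing, no str.split.
--     if not value:
--         return {}
--     d = {}
--     rest = value
--     while True:
--         j = rest.find(';;')
--         item = rest if j < 0 else rest[:j]
--         c = item.find(':')
--         if c < 0:
--             raise ValueError('item has no ":" separator: %r' % item)
--         key = item[:c].strip()
--         geom = item[c + 1:].strip()
--         p = l = r = False
--         while True:
--             e = geom.find(',')
--             t = (geom if e < 0 else geom[:e]).strip()
--             p = p or t == 'P'
--             l = l or t == 'L'
--             r = r or t == 'R'
--             if e < 0:
--                 break
--             geom = geom[e + 1:]
--         d[key] = {'P': p, 'L': l, 'R': r}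
--         if j < 0:
--             return d
--         rest = rest[j + 2:]
-- ===== Notes on version B (the rewrite author's own statement) =====
-- stated objective: alternative
-- what changed: Replaces A's three str.split passes (';;', ':' with maxsplit, ',') and the mutated three-flag dict by a consuming scanner: the string is walked with str.find and slicing, each item's flags accumulated in three booleans, with no intermediate token lists.
import Mathlib
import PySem

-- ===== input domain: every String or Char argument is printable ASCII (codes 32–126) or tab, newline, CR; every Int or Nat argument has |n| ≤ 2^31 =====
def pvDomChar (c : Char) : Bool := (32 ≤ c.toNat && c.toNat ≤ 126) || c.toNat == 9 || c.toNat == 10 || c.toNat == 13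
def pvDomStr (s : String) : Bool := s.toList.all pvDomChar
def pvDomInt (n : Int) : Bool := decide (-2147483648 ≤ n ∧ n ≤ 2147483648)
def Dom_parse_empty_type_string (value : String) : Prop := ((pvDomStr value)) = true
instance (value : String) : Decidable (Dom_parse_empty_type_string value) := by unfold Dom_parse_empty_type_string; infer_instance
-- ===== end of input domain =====

-- B replaces A's three str.split passes and the mutated flag dict by a consuming scanner:
-- it walks the string with str.find and slicing, accumulating three booleans per item
-- (objective: alternative — no intermediate token lists).

-- ===== PORT A =====
-- one iteration of A's inner loop: g = g.strip(); if g in d_: d_[g] = True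
def pvAInner (d_ : PySem.Dict String Bool) (g : String) : PySem.Dict String Bool :=
  let g := PySem.Str.strip g
  if d_.contains g then d_.insert g true else d_

-- one iteration of A's outer loop (the `| _ => d` arm makes the Python unpack total; Pre_ excludes it)
def pvAStep (d : PySem.Dict String (List (String × Bool))) (item : String) :
    PySem.Dict String (List (String × Bool)) :=
  match ((PySem.Str.splitMax? item ":" 1).getD []).map PySem.Str.strip with
  | [empty_type, geom] =>
      let d_ := (((PySem.Str.split? geom ",").getD [])).foldl pvAInner
        (PySem.Dict.mk [("P", false), ("L", false), ("R", false)])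
      d.insert empty_type d_.items
  | _ => d

def parse_empty_type_string (value : String) : List (String × List (String × Bool)) :=
  if value = "" then []
  else ((((PySem.Str.split? value ";;").getD [])).foldl pvAStep PySem.Dict.empty).items

-- ===== PORT B =====
-- B's inner while loop: scan geom with find(','), stripping each chunk and OR-ing the flags.
def pvBInner (geom : String) (p l r : Bool) : Bool × Bool × Bool :=
  let e := PySem.Str.find geom ","
  let t := PySem.Str.strip (if e < 0 then geom else PySem.Str.slice geom none (some e))
  let p := p || (t == "P")
  let l := l || (t == "L")
  let r := r || (t == "R")
  if h : e < 0 then (p, l, r)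
  else pvBInner (PySem.Str.slice geom (some (e + 1)) none) p l r
termination_by geom.toList.length
decreasing_by
  · have he : 0 ≤ PySem.Str.find geom "," := by omega
    have hinf := (PySem.Chars.find_nonneg_iff geom.toList ",".toList).mp
      (by rw [← PySem.Str.find_eq]; exact he)
    have hlen : 1 ≤ geom.toList.length := hinf.length_le
    rw [PySem.Str.toList_slice, PySem.Chars.slice_eq_listSlice,
      PySem.List.slice_from geom.toList (by omega : (0:Int) ≤ PySem.Str.find geom "," + 1)]
    simp only [List.length_drop]
    have hb : geom.toList.length = geom.length := by simp
    omega

-- B's outer while loop: split off one ';;'-item with find, process it, recurse on the rest.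
-- (On an item with no ':' the Python raises ValueError — outside Pre_ — and the port stops with d.)
def pvBLoop (d : PySem.Dict String (List (String × Bool))) (rest : String) :
    List (String × List (String × Bool)) :=
  let j := PySem.Str.find rest ";;"
  let item := if j < 0 then rest else PySem.Str.slice rest none (some j)
  let c := PySem.Str.find item ":"
  if c < 0 then d.items
  else
    let key := PySem.Str.strip (PySem.Str.slice item none (some c))
    let geom := PySem.Str.strip (PySem.Str.slice item (some (c + 1)) none)
    let f := pvBInner geom false false false
    let d := d.insert key [("P", f.1), ("L", f.2.1), ("R", f.2.2)]
    if h : j < 0 then d.items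
    else pvBLoop d (PySem.Str.slice rest (some (j + 2)) none)
termination_by rest.toList.length
decreasing_by
  · have he : 0 ≤ PySem.Str.find rest ";;" := by omega
    have hinf := (PySem.Chars.find_nonneg_iff rest.toList ";;".toList).mp
      (by rw [← PySem.Str.find_eq]; exact he)
    have hlen : 2 ≤ rest.toList.length := hinf.length_le
    rw [PySem.Str.toList_slice, PySem.Chars.slice_eq_listSlice,
      PySem.List.slice_from rest.toList (by omega : (0:Int) ≤ PySem.Str.find rest ";;" + 2)]
    simp only [List.length_drop]
    have hb : rest.toList.length = rest.length := by simp
    omega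

def parse_empty_type_string_alt (value : String) : List (String × List (String × Bool)) :=
  if value = "" then [] else pvBLoop PySem.Dict.empty value

-- ===== PRECONDITION & SPEC =====
-- Pre_ excludes the inputs on which Python A raises ValueError: a non-empty value with a
-- ';;'-separated item that contains no ':' (the 2-element unpack fails there; B raises there too).
def Pre_parse_empty_type_string (value : String) : Prop :=
  value = "" ∨ ∀ item ∈ ((PySem.Str.split? value ";;").getD []), PySem.Str.isIn ":" item = true
instance (value : String) : Decidable (Pre_parse_empty_type_string value) := by
  unfold Pre_parse_empty_type_string; infer_instance

def pvWitness_parse_empty_type_string : String := " x : P, L ;; y : R "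

def Spec_parse_empty_type_string (value : String) (out : List (String × List (String × Bool))) : Prop :=
  out = parse_empty_type_string_alt value
instance (value : String) (out : List (String × List (String × Bool))) :
    Decidable (Spec_parse_empty_type_string value out) := by
  unfold Spec_parse_empty_type_string; infer_instance

-- ===== CLAIM (what is proved, stated in full; the proofs are below) =====
def Claim_equal_parse_empty_type_string : Prop :=
  ∀ (value : String), Dom_parse_empty_type_string value →
    Pre_parse_empty_type_string value →
    Spec_parse_empty_type_string value (parse_empty_type_string value)

-- ===== LEMMAS AND PROOFS =====

-- find points at 0 when sub is a prefix
lemma pvFind_eq_zero_of_prefix {sub s : List Char} (h : sub <+: s) : PySem.Chars.find s sub = 0 := by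
  have hinf : sub <:+: s := h.isInfix
  have hnn : 0 ≤ PySem.Chars.find s sub := (PySem.Chars.find_nonneg_iff s sub).mpr hinf
  obtain ⟨-, hmin⟩ := PySem.Chars.find_spec hnn
  by_contra hne
  have hpos : 0 < (PySem.Chars.find s sub).toNat := by omega
  exact hmin 0 hpos (by simpa using h)

-- uniqueness of the first occurrence
lemma pvFind_unique {s sub : List Char} {j : Nat} (hpre : sub <+: s.drop j)
    (hmin : ∀ i < j, ¬ sub <+: s.drop i) : PySem.Chars.find s sub = j := by
  have hinf : sub <:+: s := by
    rw [← PySem.Chars.isIn_iff_infix, ← PySem.Chars.exists_prefix_drop_iff_isIn]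
    exact ⟨j, hpre⟩
  have hnn : 0 ≤ PySem.Chars.find s sub := (PySem.Chars.find_nonneg_iff s sub).mpr hinf
  obtain ⟨hp, hm⟩ := PySem.Chars.find_spec hnn
  rcases lt_trichotomy (PySem.Chars.find s sub).toNat j with h | h | h
  · exact absurd hp (hmin _ h)
  · omega
  · exact absurd hpre (hm j h)

-- find on a cons when sub is not a prefix
lemma pvFind_cons {c : Char} {rest sub : List Char} (h : ¬ sub <+: (c :: rest)) :
    PySem.Chars.find (c :: rest) sub =
      if PySem.Chars.find rest sub < 0 then -1 else PySem.Chars.find rest sub + 1 := by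
  by_cases hr : PySem.Chars.find rest sub < 0
  · have hne : PySem.Chars.find rest sub = -1 := by
      have := PySem.Chars.neg_one_le_find rest sub; omega
    have hni : ¬ sub <:+: rest := (PySem.Chars.find_eq_neg_one_iff rest sub).mp hne
    rw [if_pos hr, PySem.Chars.find_eq_neg_one_iff]
    intro hinf
    obtain ⟨j, hj⟩ := (PySem.Chars.exists_prefix_drop_iff_isIn sub (c :: rest)).mpr
      ((PySem.Chars.isIn_iff_infix sub (c :: rest)).mpr hinf)
    cases j with
    | zero => exact h (by simpa using hj)
    | succ j =>
        exact hni (by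
          rw [← PySem.Chars.isIn_iff_infix, ← PySem.Chars.exists_prefix_drop_iff_isIn]
          exact ⟨j, by simpa using hj⟩)
  · have hnn : 0 ≤ PySem.Chars.find rest sub := by omega
    obtain ⟨hp, hm⟩ := PySem.Chars.find_spec hnn
    rw [if_neg hr]
    have : PySem.Chars.find (c :: rest) sub = ((PySem.Chars.find rest sub).toNat + 1 : Nat) := by
      apply pvFind_unique
      · simpa using hp
      · intro i hi
        cases i with
        | zero => simpa using h
        | succ i => simpa using hm i (by omega)
    omega

-- proof-side model of CPython's split loop (sep = s0 :: sep', nonempty by shape)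
def pvSplitGo (s0 : Char) (sep' : List Char) : List Char → List Char → List (List Char)
  | pre, [] => [pre]
  | pre, c :: rest =>
      if (s0 :: sep').isPrefixOf (c :: rest) then
        pre :: pvSplitGo s0 sep' [] ((c :: rest).drop (s0 :: sep').length)
      else pvSplitGo s0 sep' (pre ++ [c]) rest
termination_by _ l => l.length
decreasing_by
  · simp
  · simp

-- splitOn.go is pvSplitGo
lemma pvSplitOn_go_eq (s0 : Char) (sep' : List Char) :
    ∀ fuel l cur acc, l.length < fuel →
      PySem.Chars.splitOn.go (s0 :: sep') fuel l cur acc =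
        acc.reverse ++ pvSplitGo s0 sep' cur.reverse l := by
  intro fuel
  induction fuel with
  | zero => intro l cur acc h; omega
  | succ n ih =>
      intro l cur acc h
      cases l with
      | nil => simp [PySem.Chars.splitOn.go, pvSplitGo]
      | cons c rest =>
          rw [PySem.Chars.splitOn.go]
          by_cases hp : (s0 :: sep').isPrefixOf (c :: rest)
          · rw [if_pos hp, pvSplitGo, if_pos hp]
            rw [ih _ _ _ (by simp at h ⊢; omega)]
            simp
          · rw [if_neg hp, pvSplitGo, if_neg hp]
            rw [ih _ _ _ (by simp at h ⊢; omega)]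
            simp

lemma pvSplitOn_eq (s0 : Char) (sep' : List Char) (cs : List Char) :
    PySem.Chars.splitOn cs (s0 :: sep') = pvSplitGo s0 sep' [] cs := by
  rw [PySem.Chars.splitOn, pvSplitOn_go_eq s0 sep' (cs.length + 1) cs [] [] (by omega)]
  simp

-- find-characterisation of pvSplitGo
lemma pvSplitGo_find_aux (s0 : Char) (sep' : List Char) :
    ∀ (n : Nat) (l pre : List Char), l.length ≤ n → pvSplitGo s0 sep' pre l =
      if PySem.Chars.find l (s0 :: sep') < 0 then [pre ++ l]
      else (pre ++ l.take (PySem.Chars.find l (s0 :: sep')).toNat) ::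
        pvSplitGo s0 sep' []
          (l.drop ((PySem.Chars.find l (s0 :: sep')).toNat + (s0 :: sep').length)) := by
  intro n
  induction n with
  | zero =>
      intro l pre h
      have : l = [] := by cases l <;> simp_all
      subst this
      have : PySem.Chars.find [] (s0 :: sep') = -1 := by
        rw [PySem.Chars.find_eq_neg_one_iff]
        intro hinf
        have := hinf.length_le; simp at this
      rw [pvSplitGo, this]
      simp
  | succ n ih =>
      intro l pre h
      cases l with
      | nil =>
          have : PySem.Chars.find [] (s0 :: sep') = -1 := by
            rw [PySem.Chars.find_eq_neg_one_iff]
            intro hinf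
            have := hinf.length_le; simp at this
          rw [pvSplitGo, this]
          simp
      | cons c rest =>
          by_cases hp : (s0 :: sep').isPrefixOf (c :: rest)
          · have hpre : (s0 :: sep') <+: (c :: rest) := by
              rwa [← List.isPrefixOf_iff_prefix]
            have hf : PySem.Chars.find (c :: rest) (s0 :: sep') = 0 :=
              pvFind_eq_zero_of_prefix hpre
            rw [pvSplitGo, if_pos hp, hf]
            simp
          · have hnp : ¬ (s0 :: sep') <+: (c :: rest) := by
              rwa [List.isPrefixOf_iff_prefix] at hp
            have hf := pvFind_cons hnp
            rw [pvSplitGo, if_neg hp, ih rest (pre ++ [c]) (by simp at h; omega)]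
            by_cases hr : PySem.Chars.find rest (s0 :: sep') < 0
            · rw [if_pos hr, hf, if_pos hr]
              simp
            · rw [if_neg hr, hf, if_neg hr]
              have h0 : ¬ (PySem.Chars.find rest (s0 :: sep') + 1 < 0) := by omega
              rw [if_neg h0]
              have ht : (PySem.Chars.find rest (s0 :: sep') + 1).toNat
                  = (PySem.Chars.find rest (s0 :: sep')).toNat + 1 := by omega
              rw [ht]
              rw [show (PySem.Chars.find rest (s0 :: sep')).toNat + 1 + (s0 :: sep').length
                  = ((PySem.Chars.find rest (s0 :: sep')).toNat + (s0 :: sep').length) + 1 by omega]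
              simp

lemma pvSplitGo_find (s0 : Char) (sep' : List Char) (l pre : List Char) :
    pvSplitGo s0 sep' pre l =
      if PySem.Chars.find l (s0 :: sep') < 0 then [pre ++ l]
      else (pre ++ l.take (PySem.Chars.find l (s0 :: sep')).toNat) ::
        pvSplitGo s0 sep' []
          (l.drop ((PySem.Chars.find l (s0 :: sep')).toNat + (s0 :: sep').length)) :=
  pvSplitGo_find_aux s0 sep' l.length l pre le_rfl

-- splitOnMax with m = 0 flushes immediately
lemma pvSplitOnMax_go_zero (sep : List Char) :
    ∀ fuel l cur acc, PySem.Chars.splitOnMax.go sep fuel 0 l cur acc =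
      ((cur.reverse ++ l) :: acc).reverse := by
  intro fuel l cur acc
  cases fuel with
  | zero => rw [PySem.Chars.splitOnMax.go]
  | succ n =>
      cases l with
      | nil => rw [PySem.Chars.splitOnMax.go] <;> simp
      | cons c rest => rw [PySem.Chars.splitOnMax.go]; simp

-- splitOnMax with m = 1: at most one split, at the first occurrence
lemma pvSplitOnMax_go_one (s0 : Char) (sep' : List Char) :
    ∀ fuel l cur acc, l.length < fuel →
      PySem.Chars.splitOnMax.go (s0 :: sep') fuel 1 l cur acc =
        if PySem.Chars.find l (s0 :: sep') < 0 then acc.reverse ++ [cur.reverse ++ l]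
        else acc.reverse ++ [cur.reverse ++ l.take (PySem.Chars.find l (s0 :: sep')).toNat,
          l.drop ((PySem.Chars.find l (s0 :: sep')).toNat + (s0 :: sep').length)] := by
  intro fuel
  induction fuel with
  | zero => intro l cur acc h; omega
  | succ n ih =>
      intro l cur acc h
      cases l with
      | nil =>
          have hf : PySem.Chars.find [] (s0 :: sep') = -1 := by
            rw [PySem.Chars.find_eq_neg_one_iff]
            intro hinf
            have := hinf.length_le; simp at this
          rw [PySem.Chars.splitOnMax.go, hf] <;> simp
      | cons c rest =>
          rw [PySem.Chars.splitOnMax.go]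
          simp only [Nat.one_ne_zero, if_false]
          by_cases hp : (s0 :: sep').isPrefixOf (c :: rest)
          · have hpre : (s0 :: sep') <+: (c :: rest) := by
              rwa [← List.isPrefixOf_iff_prefix]
            have hf : PySem.Chars.find (c :: rest) (s0 :: sep') = 0 :=
              pvFind_eq_zero_of_prefix hpre
            rw [if_pos hp, pvSplitOnMax_go_zero, hf]
            simp
          · have hnp : ¬ (s0 :: sep') <+: (c :: rest) := by
              rwa [List.isPrefixOf_iff_prefix] at hp
            have hf := pvFind_cons hnp
            rw [if_neg hp, ih rest (c :: cur) acc (by simp at h ⊢; omega)]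
            by_cases hr : PySem.Chars.find rest (s0 :: sep') < 0
            · rw [if_pos hr, hf, if_pos hr]
              simp
            · rw [if_neg hr, hf, if_neg hr]
              have h0 : ¬ (PySem.Chars.find rest (s0 :: sep') + 1 < 0) := by omega
              rw [if_neg h0]
              have ht : (PySem.Chars.find rest (s0 :: sep') + 1).toNat
                  = (PySem.Chars.find rest (s0 :: sep')).toNat + 1 := by omega
              rw [ht]
              rw [show (PySem.Chars.find rest (s0 :: sep')).toNat + 1 + (s0 :: sep').length
                  = ((PySem.Chars.find rest (s0 :: sep')).toNat + (s0 :: sep').length) + 1 by omega]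
              simp

-- A's inner loop over tokens, from an arbitrary 3-flag state
lemma pvInner_eq (ts : List String) (p l r : Bool) :
    ts.foldl pvAInner (PySem.Dict.mk [("P", p), ("L", l), ("R", r)]) =
      PySem.Dict.mk
        [("P", p || ts.any (fun g => PySem.Str.strip g == "P")),
         ("L", l || ts.any (fun g => PySem.Str.strip g == "L")),
         ("R", r || ts.any (fun g => PySem.Str.strip g == "R"))] := by
  induction ts generalizing p l r with
  | nil => simp
  | cons g ts ih =>
      simp only [List.foldl_cons, List.any_cons]
      by_cases hP : PySem.Str.strip g = "P"
      · rw [show ts.foldl pvAInner (pvAInner (PySem.Dict.mk [("P", p), ("L", l), ("R", r)]) g)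
            = ts.foldl pvAInner (PySem.Dict.mk [("P", true), ("L", l), ("R", r)]) from by
          simp [pvAInner, hP, PySem.Dict.contains, PySem.Dict.insert]]
        rw [ih]; simp [hP]
      · by_cases hL : PySem.Str.strip g = "L"
        · rw [show ts.foldl pvAInner (pvAInner (PySem.Dict.mk [("P", p), ("L", l), ("R", r)]) g)
              = ts.foldl pvAInner (PySem.Dict.mk [("P", p), ("L", true), ("R", r)]) from by
            simp [pvAInner, hL, PySem.Dict.contains, PySem.Dict.insert]]
          rw [ih]; simp [hL]
        · by_cases hR : PySem.Str.strip g = "R"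
          · rw [show ts.foldl pvAInner (pvAInner (PySem.Dict.mk [("P", p), ("L", l), ("R", r)]) g)
                = ts.foldl pvAInner (PySem.Dict.mk [("P", p), ("L", l), ("R", true)]) from by
              simp [pvAInner, hR, PySem.Dict.contains, PySem.Dict.insert]]
            rw [ih]; simp [hR]
          · have eP : (PySem.Str.strip g == "P") = false := by simp [hP]
            have eL : (PySem.Str.strip g == "L") = false := by simp [hL]
            have eR : (PySem.Str.strip g == "R") = false := by simp [hR]
            rw [show pvAInner (PySem.Dict.mk [("P", p), ("L", l), ("R", r)]) g
                = PySem.Dict.mk [("P", p), ("L", l), ("R", r)] from by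
              simp [pvAInner, PySem.Dict.contains, Ne.symm hP, Ne.symm hL, Ne.symm hR]]
            rw [ih]; simp [eP, eL, eR]

lemma pvOfListBeq (u : List Char) (X : String) : (String.ofList u == X) = (u == X.toList) := by
  rw [Bool.eq_iff_iff]
  simp [← String.toList_inj]

lemma pvSplitStr (s sep : String) (s0 : Char) (sep' : List Char) (hsep : sep.toList = s0 :: sep') :
    (PySem.Str.split? s sep).getD [] = (pvSplitGo s0 sep' [] s.toList).map String.ofList := by
  simp [PySem.Str.split?, PySem.Chars.split?, hsep, pvSplitOn_eq]

-- token-wise "any" flag, on the char side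
def pvCAny (cs X : List Char) : Bool :=
  (pvSplitGo ',' [] [] cs).any (fun t => PySem.Chars.strip t == X)

lemma pvTok_eq (geom X : String) :
    (((PySem.Str.split? geom ",").getD [])).any (fun g => PySem.Str.strip g == X)
      = pvCAny geom.toList X.toList := by
  rw [pvSplitStr geom "," ',' [] rfl, List.any_map, pvCAny]
  congr 1
  funext t
  simp [Function.comp, PySem.Str.strip, pvOfListBeq]

lemma pvBInner_aux : ∀ (n : Nat) (geom : String) (p l r : Bool), geom.toList.length ≤ n →
    pvBInner geom p l r =
      (p || pvCAny geom.toList "P".toList,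
       l || pvCAny geom.toList "L".toList,
       r || pvCAny geom.toList "R".toList) := by
  intro n
  induction n using Nat.strong_induction_on with
  | _ n ih =>
      intro geom p l r hlen
      have hfeq : PySem.Str.find geom "," = PySem.Chars.find geom.toList [','] :=
        PySem.Str.find_eq geom ","
      by_cases he : PySem.Str.find geom "," < 0
      · rw [pvBInner]
        simp only [if_pos he, dif_pos he]
        have hcs : PySem.Chars.find geom.toList [','] < 0 := by rw [← hfeq]; exact he
        simp [pvCAny, pvSplitGo_find ',' [] geom.toList [], if_pos hcs, PySem.Str.strip,
          pvOfListBeq]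
      · rw [pvBInner]
        simp only [if_neg he, dif_neg he]
        have hcs : ¬ PySem.Chars.find geom.toList [','] < 0 := by rw [← hfeq]; exact he
        have hrec := ih (geom.toList.length - ((PySem.Chars.find geom.toList [',']).toNat + 1))
          (by
            have h1 : 1 ≤ geom.toList.length := by
              have hinf := (PySem.Chars.find_nonneg_iff geom.toList [',']).mp (by omega)
              exact hinf.length_le
            omega)
          (PySem.Str.slice geom (some (PySem.Str.find geom "," + 1)))
        have htl : (PySem.Str.slice geom (some (PySem.Str.find geom "," + 1))).toList
            = geom.toList.drop ((PySem.Chars.find geom.toList [',']).toNat + 1) := by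
          rw [PySem.Str.toList_slice, PySem.Chars.slice_eq_listSlice,
            PySem.List.slice_from geom.toList (by omega : (0:Int) ≤ PySem.Str.find geom "," + 1)]
          congr 1
          omega
        rw [hrec _ _ _ (by rw [htl]; simp)]
        have hslice : (PySem.Str.slice geom none (some (PySem.Str.find geom ","))).toList
            = geom.toList.take (PySem.Chars.find geom.toList [',']).toNat := by
          rw [PySem.Str.toList_slice, PySem.Chars.slice_eq_listSlice,
            PySem.List.slice_to geom.toList (by omega : (0:Int) ≤ PySem.Str.find geom ",")]
          congr 1
          try omega
        have hany : ∀ X : List Char, pvCAny geom.toList X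
            = ((PySem.Chars.strip (geom.toList.take (PySem.Chars.find geom.toList [',']).toNat) == X)
               || pvCAny (geom.toList.drop ((PySem.Chars.find geom.toList [',']).toNat + 1)) X) := by
          intro X
          rw [pvCAny, pvSplitGo_find ',' [] geom.toList [], if_neg hcs]
          simp [pvCAny]
        simp only [htl, hany, PySem.Str.strip, hslice, pvOfListBeq]
        simp [Bool.or_assoc]

-- B's inner scan computes exactly A's per-token "any" flags
lemma pvBInner_eq (geom : String) (p l r : Bool) :
    pvBInner geom p l r =
      (p || (((PySem.Str.split? geom ",").getD [])).any (fun g => PySem.Str.strip g == "P"),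
       l || (((PySem.Str.split? geom ",").getD [])).any (fun g => PySem.Str.strip g == "L"),
       r || (((PySem.Str.split? geom ",").getD [])).any (fun g => PySem.Str.strip g == "R")) := by
  simp only [pvTok_eq]
  exact pvBInner_aux geom.toList.length geom p l r le_rfl

-- A's per-item step, written in B's vocabulary (needs the item to contain ':')
lemma pvAStep_eq (d : PySem.Dict String (List (String × Bool))) (item : String)
    (hc : 0 ≤ PySem.Str.find item ":") :
    pvAStep d item =
      d.insert (PySem.Str.strip (PySem.Str.slice item none (some (PySem.Str.find item ":"))))
        (let f := pvBInner
            (PySem.Str.strip (PySem.Str.slice item (some (PySem.Str.find item ":" + 1)) none))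
            false false false
         [("P", f.1), ("L", f.2.1), ("R", f.2.2)]) := by
  have hfeq : PySem.Str.find item ":" = PySem.Chars.find item.toList [':'] :=
    PySem.Str.find_eq item ":"
  have hc' : 0 ≤ PySem.Chars.find item.toList [':'] := by rw [← hfeq]; exact hc
  have hmax : PySem.Chars.splitOnMax item.toList [':'] 1
      = [item.toList.take (PySem.Chars.find item.toList [':']).toNat,
         item.toList.drop ((PySem.Chars.find item.toList [':']).toNat + 1)] := by
    rw [PySem.Chars.splitOnMax, if_neg (by omega : ¬ (1:Int) < 0)]
    rw [show ((1:Int).toNat) = 1 from rfl]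
    rw [pvSplitOnMax_go_one ':' [] (item.toList.length + 1) item.toList [] [] (by omega),
      if_neg (by omega : ¬ PySem.Chars.find item.toList [':'] < 0)]
    simp
  have hsm : ((PySem.Str.splitMax? item ":" 1).getD []).map PySem.Str.strip
      = [String.ofList (PySem.Chars.strip
           (item.toList.take (PySem.Chars.find item.toList [':']).toNat)),
         String.ofList (PySem.Chars.strip
           (item.toList.drop ((PySem.Chars.find item.toList [':']).toNat + 1)))] := by
    simp [PySem.Str.splitMax?, PySem.Chars.splitMax?, hmax, PySem.Str.strip]
  have hkey : PySem.Str.strip (PySem.Str.slice item none (some (PySem.Str.find item ":")))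
      = String.ofList (PySem.Chars.strip
          (item.toList.take (PySem.Chars.find item.toList [':']).toNat)) := by
    rw [PySem.Str.strip, PySem.Str.toList_slice, PySem.Chars.slice_eq_listSlice,
      PySem.List.slice_to item.toList (by omega : (0:Int) ≤ PySem.Str.find item ":"), hfeq]
  have hgeom : PySem.Str.strip (PySem.Str.slice item (some (PySem.Str.find item ":" + 1)) none)
      = String.ofList (PySem.Chars.strip
          (item.toList.drop ((PySem.Chars.find item.toList [':']).toNat + 1))) := by
    rw [PySem.Str.strip, PySem.Str.toList_slice, PySem.Chars.slice_eq_listSlice,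
      PySem.List.slice_from item.toList (by omega : (0:Int) ≤ PySem.Str.find item ":" + 1)]
    congr 3
    omega
  rw [pvAStep, hsm]
  simp only [pvInner_eq]
  rw [hkey, hgeom, pvBInner_eq]

lemma pvBLoop_aux : ∀ (n : Nat) (rest : String) (d : PySem.Dict String (List (String × Bool))),
    rest.toList.length ≤ n →
    (∀ item ∈ ((PySem.Str.split? rest ";;").getD []), PySem.Str.isIn ":" item = true) →
    pvBLoop d rest = (((PySem.Str.split? rest ";;").getD []).foldl pvAStep d).items := by
  intro n
  induction n using Nat.strong_induction_on with
  | _ n ih =>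
      intro rest d hlen h
      have hfeq : PySem.Str.find rest ";;" = PySem.Chars.find rest.toList [';',';'] :=
        PySem.Str.find_eq rest ";;"
      have hsplit := pvSplitStr rest ";;" ';' [';'] rfl
      by_cases hj : PySem.Str.find rest ";;" < 0
      · have hcs : PySem.Chars.find rest.toList [';',';'] < 0 := by rw [← hfeq]; exact hj
        have hlist : (PySem.Str.split? rest ";;").getD [] = [rest] := by
          rw [hsplit, pvSplitGo_find ';' [';'] rest.toList [], if_pos hcs]
          simp [String.ofList_toList]
        have hin : PySem.Str.isIn ":" rest = true := by
          rw [hlist] at h; exact h rest (by simp)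
        have hcol : 0 ≤ PySem.Str.find rest ":" := by
          rw [PySem.Str.find_eq]
          exact (PySem.Chars.find_nonneg_iff _ _).mpr
            ((PySem.Chars.isIn_iff_infix _ _).mp (by rw [← PySem.Str.isIn_eq]; exact hin))
        rw [pvBLoop]
        simp only [if_pos hj, if_neg (by omega : ¬ PySem.Str.find rest ":" < 0), dif_pos hj]
        rw [hlist]
        simp only [List.foldl_cons, List.foldl_nil]
        rw [pvAStep_eq d rest hcol]
      · have hcs : ¬ PySem.Chars.find rest.toList [';',';'] < 0 := by rw [← hfeq]; exact hj
        have h2 : 2 ≤ rest.toList.length := by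
          have hinf := (PySem.Chars.find_nonneg_iff rest.toList [';',';']).mp (by omega)
          exact hinf.length_le
        have hlist : (PySem.Str.split? rest ";;").getD []
            = String.ofList (rest.toList.take (PySem.Chars.find rest.toList [';',';']).toNat)
              :: (pvSplitGo ';' [';'] []
                   (rest.toList.drop ((PySem.Chars.find rest.toList [';',';']).toNat + 2))).map
                   String.ofList := by
          rw [hsplit, pvSplitGo_find ';' [';'] rest.toList [], if_neg hcs]
          simp
        have hitem : PySem.Str.slice rest none (some (PySem.Str.find rest ";;"))
            = String.ofList (rest.toList.take (PySem.Chars.find rest.toList [';',';']).toNat) := by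
          rw [show PySem.Str.slice rest none (some (PySem.Str.find rest ";;"))
              = String.ofList ((PySem.Str.slice rest none
                  (some (PySem.Str.find rest ";;"))).toList) from
              String.ofList_toList.symm,
            PySem.Str.toList_slice, PySem.Chars.slice_eq_listSlice,
            PySem.List.slice_to rest.toList (by omega : (0:Int) ≤ PySem.Str.find rest ";;"), hfeq]
        have hrest' : (PySem.Str.slice rest (some (PySem.Str.find rest ";;" + 2)) none).toList
            = rest.toList.drop ((PySem.Chars.find rest.toList [';',';']).toNat + 2) := by
          rw [PySem.Str.toList_slice, PySem.Chars.slice_eq_listSlice,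
            PySem.List.slice_from rest.toList (by omega : (0:Int) ≤ PySem.Str.find rest ";;" + 2)]
          congr 1
          omega
        have htail : (PySem.Str.split?
              (PySem.Str.slice rest (some (PySem.Str.find rest ";;" + 2)) none) ";;").getD []
            = (pvSplitGo ';' [';'] []
                (rest.toList.drop ((PySem.Chars.find rest.toList [';',';']).toNat + 2))).map
                String.ofList := by
          rw [pvSplitStr _ ";;" ';' [';'] rfl, hrest']
        have hin : PySem.Str.isIn ":"
            (String.ofList (rest.toList.take (PySem.Chars.find rest.toList [';',';']).toNat))
            = true := by
          rw [hlist] at h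
          exact h _ (by simp)
        have hcol' : 0 ≤ PySem.Str.find
            (String.ofList (rest.toList.take (PySem.Chars.find rest.toList [';',';']).toNat))
            ":" := by
          rw [PySem.Str.find_eq]
          exact (PySem.Chars.find_nonneg_iff _ _).mpr
            ((PySem.Chars.isIn_iff_infix _ _).mp (by rw [← PySem.Str.isIn_eq]; exact hin))
        have hcol : 0 ≤ PySem.Str.find
            (PySem.Str.slice rest none (some (PySem.Str.find rest ";;"))) ":" := by
          rw [hitem]; exact hcol'
        rw [pvBLoop]
        simp only [if_neg hj, if_neg (by omega : ¬ PySem.Str.find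
          (PySem.Str.slice rest none (some (PySem.Str.find rest ";;"))) ":" < 0), dif_neg hj]
        rw [ih (rest.toList.length - 2) (by omega) _ _
          (by rw [hrest']; simp; omega)
          (by
            rw [htail]
            intro it hit
            rw [hlist] at h
            exact h it (by simp [hit]))]
        rw [htail, hlist]
        simp only [List.foldl_cons]
        rw [pvAStep_eq d _ hcol', hitem]

-- B's loop equals A's fold over the ';;'-split, provided every item contains ':'
lemma pvBLoop_eq (rest : String) (d : PySem.Dict String (List (String × Bool)))
    (h : ∀ item ∈ ((PySem.Str.split? rest ";;").getD []), PySem.Str.isIn ":" item = true) :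
    pvBLoop d rest = (((PySem.Str.split? rest ";;").getD []).foldl pvAStep d).items :=
  pvBLoop_aux rest.toList.length rest d le_rfl h

-- ===== VERDICT (by name: the statement is the Claim_ definition above) =====
theorem parse_empty_type_string_spec : Claim_equal_parse_empty_type_string := by
  intro value _ hpre
  unfold Spec_parse_empty_type_string parse_empty_type_string parse_empty_type_string_alt
  by_cases hv : value = ""
  · simp [hv]
  · simp only [hv, if_false]
    rcases hpre with h | h
    · exact absurd h hv
    · exact (pvBLoop_eq value PySem.Dict.empty h).symm
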